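-- pv_equiv track=rewrite | github.com/rheeger/spark-stacker | packages/spark-app/tests/_utils/cli/reporting/scenario_reporter.py | _get_common_scenarios
-- ===== SOURCE A (Python) =====
-- from typing import Any, Dict, List, Optional, Tuple
--
-- def _get_common_scenarios(strategies: Dict[str, Dict[str, Dict[str, Any]]]) -> List[str]:
--     """Get scenarios common to all strategies."""
--     if not strategies:
--         return []
--
--     all_scenarios = set()
--     first_strategy = True
--
--     for strategy_results in strategies.values():
--         scenario_set = set(strategy_results.keys())
--         if first_strategy:
--             all_scenarios = scenario_set
--             first_strategy = False
--         else:
--             all_scenarios &= scenario_set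
--
--     return sorted(list(all_scenarios))
-- ===== SOURCE B (Python) =====
-- from typing import Any, Dict, List, Optional, Tuple
--
-- def _get_common_scenarios(strategies: Dict[str, Dict[str, Dict[str, Any]]]) -> List[str]:
--     """Get scenarios common to all strategies."""
--     if not strategies:
--         return []
--
--     counts: Dict[str, int] = {}
--     for strategy_results in strategies.values():
--         for scenario in strategy_results:
--             counts[scenario] = counts.get(scenario, 0) + 1
--
--     n = len(strategies)
--     return sorted(k for k, c in counts.items() if c == n)
-- ===== Notes on version B (the rewrite author's own statement) =====
-- stated objective: idiomatic
-- what changed: Replaces the progressive set-intersection fold (with a first-strategy flag) by a single frequency-count pass over all scenario keys followed by a filter selecting keys whose tally equals the number of strategies.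
import Mathlib
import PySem

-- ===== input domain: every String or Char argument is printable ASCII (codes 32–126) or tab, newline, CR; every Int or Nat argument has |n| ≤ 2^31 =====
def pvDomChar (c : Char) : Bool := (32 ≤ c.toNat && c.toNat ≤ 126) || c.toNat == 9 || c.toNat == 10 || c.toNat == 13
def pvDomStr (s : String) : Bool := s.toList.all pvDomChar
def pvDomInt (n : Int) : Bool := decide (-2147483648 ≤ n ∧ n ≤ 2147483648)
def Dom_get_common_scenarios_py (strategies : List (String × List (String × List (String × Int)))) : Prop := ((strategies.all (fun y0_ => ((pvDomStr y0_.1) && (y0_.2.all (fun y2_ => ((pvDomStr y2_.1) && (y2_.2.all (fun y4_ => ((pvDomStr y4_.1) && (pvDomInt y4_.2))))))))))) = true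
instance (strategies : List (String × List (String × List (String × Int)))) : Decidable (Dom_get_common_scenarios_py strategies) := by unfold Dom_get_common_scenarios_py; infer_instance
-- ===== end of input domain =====

-- ===== PORT A =====
-- B replaces the progressive set-intersection fold by one frequency-count pass + filter (idiomatic; return value only).
def get_common_scenarios_py (strategies : List (String × List (String × List (String × Int)))) : List String :=
  if strategies = [] then []
  else
    -- loop over strategies.values() maintaining (all_scenarios, first_strategy);
    -- sorted(list(set)) is exact: sorting distinct strings does not depend on set iteration order
    let st := strategies.foldl
      (fun (acc : PySem.Set String × Bool) sr =>
        let scenario_set := PySem.Set.ofList (sr.2.map Prod.fst)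
        if acc.2 then (scenario_set, false)
        else (PySem.Set.inter acc.1 scenario_set, false))
      (PySem.Set.empty, true)
    PySem.List.sorted st.1 (fun x => x) false

-- ===== PORT B =====
def get_common_scenarios_py_alt (strategies : List (String × List (String × List (String × Int)))) : List String :=
  if strategies = [] then []
  else
    let counts := strategies.foldl
      (fun (d : PySem.Dict String Int) sr =>
        (sr.2.map Prod.fst).foldl (fun d k => d.insert k (d.getD k 0 + 1)) d)
      PySem.Dict.empty
    let n : Int := (strategies.length : Int)
    PySem.List.sorted (counts.items.filterMap (fun kc => if kc.2 = n then some kc.1 else none)) (fun x => x) false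

-- ===== PRECONDITION & SPEC =====
-- Pre_ only excludes association lists with a duplicated strategy key or a duplicated scenario
-- key inside one strategy: such lists do not represent any Python dict, so A is never run on them.
def Pre_get_common_scenarios_py (strategies : List (String × List (String × List (String × Int)))) : Prop :=
  (strategies.map Prod.fst).Nodup ∧ ∀ sr ∈ strategies, (sr.2.map Prod.fst).Nodup
instance (strategies : List (String × List (String × List (String × Int)))) : Decidable (Pre_get_common_scenarios_py strategies) := by unfold Pre_get_common_scenarios_py; infer_instance
def pvWitness_get_common_scenarios_py : (List (String × List (String × List (String × Int)))) :=
  [("s1", [("a", [("x", 1)]), ("b", [])]), ("s2", [("b", []), ("c", [])])]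
def Spec_get_common_scenarios_py (strategies : List (String × List (String × List (String × Int)))) (out : List String) : Prop := out = get_common_scenarios_py_alt strategies
instance (strategies : List (String × List (String × List (String × Int)))) (out : List String) : Decidable (Spec_get_common_scenarios_py strategies out) := by unfold Spec_get_common_scenarios_py; infer_instance

-- ===== CLAIM (what is proved, stated in full; the proofs are below) =====
def Claim_equal_get_common_scenarios_py : Prop := ∀ (strategies : List (String × List (String × List (String × Int)))), Dom_get_common_scenarios_py strategies → Pre_get_common_scenarios_py strategies → Spec_get_common_scenarios_py strategies (get_common_scenarios_py strategies)

-- ===== LEMMAS AND PROOFS =====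

-- A's intersection fold from an arbitrary set, first flag already false
theorem interFold_mem (rest : List (String × List (String × List (String × Int))))
    (s : PySem.Set String) (x : String) :
    x ∈ (rest.foldl
      (fun (acc : PySem.Set String × Bool) sr =>
        if acc.2 then (PySem.Set.ofList (sr.2.map Prod.fst), false)
        else (PySem.Set.inter acc.1 (PySem.Set.ofList (sr.2.map Prod.fst)), false))
      (s, false)).1 ↔ x ∈ s ∧ ∀ sr ∈ rest, x ∈ sr.2.map Prod.fst := by
  induction rest generalizing s with
  | nil => simp
  | cons hd tl ih =>
    simp only [List.foldl_cons, List.mem_cons, Bool.false_eq_true, if_false]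
    rw [ih]
    simp [PySem.Set.mem_inter, PySem.Set.mem_ofList]
    tauto

theorem interFold_nodup (rest : List (String × List (String × List (String × Int))))
    (s : PySem.Set String) (hs : s.Nodup) :
    ((rest.foldl
      (fun (acc : PySem.Set String × Bool) sr =>
        if acc.2 then (PySem.Set.ofList (sr.2.map Prod.fst), false)
        else (PySem.Set.inter acc.1 (PySem.Set.ofList (sr.2.map Prod.fst)), false))
      (s, false)).1).Nodup := by
  induction rest generalizing s with
  | nil => simpa
  | cons hd tl ih =>
    simp only [List.foldl_cons, Bool.false_eq_true, if_false]
    exact ih _ (PySem.Set.nodup_inter _ _ hs)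

-- the flattened key list has at most one occurrence of x per strategy
theorem count_flat_le (strategies : List (String × List (String × List (String × Int))))
    (hn : ∀ sr ∈ strategies, (sr.2.map Prod.fst).Nodup) (x : String) :
    (strategies.flatMap (fun sr => sr.2.map Prod.fst)).count x ≤ strategies.length := by
  induction strategies with
  | nil => simp
  | cons hd tl ih =>
    simp only [List.flatMap_cons, List.count_append, List.length_cons]
    have h1 : (hd.2.map Prod.fst).count x ≤ 1 :=
      List.nodup_iff_count_le_one.mp (hn hd (by simp)) x
    have h2 := ih (fun sr h => hn sr (by simp [h]))
    omega

-- count of x in the flattened key list, when inner key lists are Nodup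
theorem count_flat_eq_length_iff (strategies : List (String × List (String × List (String × Int))))
    (hn : ∀ sr ∈ strategies, (sr.2.map Prod.fst).Nodup) (x : String) :
    (strategies.flatMap (fun sr => sr.2.map Prod.fst)).count x = strategies.length ↔
      ∀ sr ∈ strategies, x ∈ sr.2.map Prod.fst := by
  induction strategies with
  | nil => simp
  | cons hd tl ih =>
    simp only [List.flatMap_cons, List.count_append, List.length_cons, List.forall_mem_cons]
    have h1 : (hd.2.map Prod.fst).count x ≤ 1 :=
      List.nodup_iff_count_le_one.mp (hn hd (by simp)) x
    have h2 := count_flat_le tl (fun sr h => hn sr (by simp [h])) x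
    have h3 := ih (fun sr h => hn sr (by simp [h]))
    have h4 : x ∈ hd.2.map Prod.fst ↔ (hd.2.map Prod.fst).count x = 1 := by
      rw [← List.count_pos_iff]; omega
    rw [← h3, h4]
    omega

-- B's nested counting fold is the counter of the flattened key list
theorem counts_eq_counter (strategies : List (String × List (String × List (String × Int)))) :
    strategies.foldl
      (fun (d : PySem.Dict String Int) sr =>
        (sr.2.map Prod.fst).foldl (fun d k => d.insert k (d.getD k 0 + 1)) d)
      PySem.Dict.empty
    = PySem.Dict.counter (strategies.flatMap (fun sr => sr.2.map Prod.fst)) := by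
  rw [← PySem.Dict.foldl_insert_getD_add_one_eq_counter, List.flatMap_def,
    List.foldl_flatten, List.foldl_map]

theorem filterMap_if_eq_filter {α : Type} (p : α → Prop) [DecidablePred p] (l : List α) :
    l.filterMap (fun a => if p a then some a else none) = l.filter (fun a => decide (p a)) := by
  induction l with
  | nil => simp
  | cons h t ih => by_cases hp : p h <;> simp [hp, ih]

-- ===== VERDICT (by name: the statement is the Claim_ definition above) =====
theorem get_common_scenarios_py_spec : Claim_equal_get_common_scenarios_py := by
  intro strategies hdom hpre
  unfold Spec_get_common_scenarios_py get_common_scenarios_py get_common_scenarios_py_alt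
  rcases strategies with _ | ⟨hd, tl⟩
  · simp
  · rw [if_neg (by simp), if_neg (by simp)]
    simp only []
    rw [counts_eq_counter, PySem.Dict.items_counter]
    simp only [List.filterMap_map, Function.comp]
    set K := ((hd :: tl).flatMap (fun sr => sr.2.map Prod.fst)) with hK
    set n : Int := (((hd :: tl) : List (String × List (String × List (String × Int)))).length : Int) with hn
    rw [filterMap_if_eq_filter (fun k => (K.count k : Int) = n)]
    -- reduce the first iteration of A's fold (first_strategy = true)
    simp only [List.foldl_cons, if_true]
    apply PySem.List.sorted_eq_sorted_of_perm _ _ _ (fun a b h => h)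
    apply (List.perm_ext_iff_of_nodup _ _).mpr
    · intro x
      rw [interFold_mem, List.mem_filter]
      have hcnt := count_flat_eq_length_iff (hd :: tl) hpre.2 x
      simp only [PySem.Set.mem_ofList, List.forall_mem_cons] at hcnt ⊢
      constructor
      · rintro ⟨hhd, htl⟩
        refine ⟨?_, ?_⟩
        · exact List.mem_flatMap.mpr ⟨hd, List.mem_cons_self .., hhd⟩
        · have : K.count x = (hd :: tl).length := hcnt.mpr ⟨hhd, htl⟩
          simp [hn, this]
      · rintro ⟨hmem, hc⟩
        have : K.count x = (hd :: tl).length := by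
          have := of_decide_eq_true hc
          omega
        exact hcnt.mp this
    · exact interFold_nodup tl _ (PySem.Set.nodup_ofList _)
    · exact (PySem.Set.nodup_ofList K).filter _
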